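-- pv_equiv track=rewrite | github.com/TotoMC-13/introduccion-a-la-programacion | Parciales Python/Parcial 4/soluciones.py | contar_traducciones_iguales
-- ===== SOURCE A (Python) =====
-- def pertenece(elementos: list[int], elemento: int) -> bool:
--     for i in elementos:
--         if i == elemento:
--             return True
--
--     return False
--
-- def contar_traducciones_iguales(ing: dict[str, str], ale: dict[str, str]) -> int:
--     res: list[str] = []
--     palabras_aleman: list[str] = []
--
--     for palabra in ale:
--         palabras_aleman.append(ale[palabra])
--
--     for i in ing:
--         if pertenece(palabras_aleman, ing[i]):
--             res.append(ing[i])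
--
--     return len(res)
-- ===== SOURCE B (Python) =====
-- def contar_traducciones_iguales(ing: dict[str, str], ale: dict[str, str]) -> int:
--     freq: dict[str, int] = {}
--     for v in ing.values():
--         freq[v] = freq.get(v, 0) + 1
--     return sum(freq.get(v, 0) for v in set(ale.values()))
-- ===== Notes on version B (the rewrite author's own statement) =====
-- stated objective: faster
-- what changed: Instead of scanning the list of German values once per English value (nested linear scans appending matches to a result list), B builds a frequency table of the English values in one pass and returns the sum of the frequencies over the distinct German values.
import Mathlib
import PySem

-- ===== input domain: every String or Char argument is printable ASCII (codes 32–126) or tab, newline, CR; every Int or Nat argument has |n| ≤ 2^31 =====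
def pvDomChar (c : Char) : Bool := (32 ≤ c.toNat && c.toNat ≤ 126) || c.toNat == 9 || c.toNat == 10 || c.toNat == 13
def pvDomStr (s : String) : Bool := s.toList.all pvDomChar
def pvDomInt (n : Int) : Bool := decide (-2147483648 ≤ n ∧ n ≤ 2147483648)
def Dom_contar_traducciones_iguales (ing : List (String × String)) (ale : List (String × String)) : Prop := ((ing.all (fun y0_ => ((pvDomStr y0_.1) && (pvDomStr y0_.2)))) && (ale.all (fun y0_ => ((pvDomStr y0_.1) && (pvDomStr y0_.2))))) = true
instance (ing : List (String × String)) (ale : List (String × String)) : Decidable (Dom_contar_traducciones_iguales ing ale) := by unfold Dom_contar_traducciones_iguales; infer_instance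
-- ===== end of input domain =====

-- B replaces A's per-English-value linear scan of the German values by a one-pass
-- frequency table of the English values summed over the distinct German values (idiomatic, asymptotically fewer comparisons).

-- ===== PORT A =====
def pertenece (elementos : List String) (elemento : String) : Bool :=
  match elementos with
  | [] => false
  | i :: rest => if i == elemento then true else pertenece rest elemento

def contar_traducciones_iguales (ing : List (String × String)) (ale : List (String × String)) : Int :=
  let ingD : PySem.Dict String String := PySem.Dict.mk ing
  let aleD : PySem.Dict String String := PySem.Dict.mk ale
  let palabras_aleman : List String :=
    (PySem.Dict.keys aleD).foldl (fun acc palabra => acc ++ [PySem.Dict.getD aleD palabra ""]) []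
  let res : List String :=
    (PySem.Dict.keys ingD).foldl
      (fun acc i =>
        if pertenece palabras_aleman (PySem.Dict.getD ingD i "") then acc ++ [PySem.Dict.getD ingD i ""]
        else acc) []
  (res.length : Int)

-- ===== PORT B =====
def contar_traducciones_iguales_alt (ing : List (String × String)) (ale : List (String × String)) : Int :=
  let freq : PySem.Dict String Int :=
    (PySem.Dict.values (PySem.Dict.mk ing)).foldl
      (fun d v => PySem.Dict.insert d v (PySem.Dict.getD d v 0 + 1)) PySem.Dict.empty
  let s : PySem.Set String := PySem.Set.ofList (PySem.Dict.values (PySem.Dict.mk ale))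
  s.foldl (fun acc v => acc + PySem.Dict.getD freq v 0) 0

-- ===== PRECONDITION & SPEC =====
-- Pre_ only says the association lists really encode Python dicts (distinct keys);
-- it excludes no input A can receive, since a Python dict cannot have duplicate keys.
def Pre_contar_traducciones_iguales (ing : List (String × String)) (ale : List (String × String)) : Prop :=
  (ing.map Prod.fst).Nodup ∧ (ale.map Prod.fst).Nodup
instance (ing : List (String × String)) (ale : List (String × String)) : Decidable (Pre_contar_traducciones_iguales ing ale) := by unfold Pre_contar_traducciones_iguales; infer_instance

def pvWitness_contar_traducciones_iguales : (List (String × String)) × (List (String × String)) :=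
  ([("dog", "perro"), ("cat", "gato")], [("Hund", "perro")])

def Spec_contar_traducciones_iguales (ing : List (String × String)) (ale : List (String × String)) (out : Int) : Prop := out = contar_traducciones_iguales_alt ing ale
instance (ing : List (String × String)) (ale : List (String × String)) (out : Int) : Decidable (Spec_contar_traducciones_iguales ing ale out) := by unfold Spec_contar_traducciones_iguales; infer_instance

-- ===== CLAIM (what is proved, stated in full; the proofs are below) =====
def Claim_equal_contar_traducciones_iguales : Prop := ∀ (ing : List (String × String)) (ale : List (String × String)), Dom_contar_traducciones_iguales ing ale → Pre_contar_traducciones_iguales ing ale → Spec_contar_traducciones_iguales ing ale (contar_traducciones_iguales ing ale)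

-- ===== LEMMAS AND PROOFS =====

-- pertenece is list membership
theorem pertenece_eq_mem (xs : List String) (x : String) :
    pertenece xs x = decide (x ∈ xs) := by
  induction xs with
  | nil => simp [pertenece]
  | cons a rest ih =>
    simp only [pertenece]
    by_cases h : a = x
    · simp [h]
    · simp [h, Ne.symm h, ih, List.mem_cons]

-- disjoint membership split for countP
theorem countP_cons_mem (V : List String) (s : String) (S : List String) (hs : s ∉ S) :
    V.countP (fun x => decide (x ∈ s :: S)) = V.count s + V.countP (fun x => decide (x ∈ S)) := by
  induction V with
  | nil => simp
  | cons v V ih =>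
    rw [List.countP_cons, List.countP_cons, List.count_cons, ih]
    by_cases hv : v = s
    · subst hv
      simp [hs, List.mem_cons]
      omega
    · by_cases hvS : v ∈ S
      · simp [hv, hvS, List.mem_cons]
        omega
      · simp [hv, hvS, List.mem_cons]

-- summing multiplicities over a duplicate-free list of values counts occurrences
theorem sum_count_eq_countP (S V : List String) (h : S.Nodup) :
    (S.map (fun v => (V.count v : Int))).sum
      = (V.countP (fun x => decide (x ∈ S)) : Int) := by
  induction S with
  | nil => simp
  | cons s S ih =>
    have hs : s ∉ S := (List.nodup_cons.mp h).1
    rw [List.map_cons, List.sum_cons, ih (List.nodup_cons.mp h).2,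
        countP_cons_mem V s S hs]
    push_cast
    ring

-- ===== VERDICT (by name: the statement is the Claim_ definition above) =====
theorem contar_traducciones_iguales_spec : Claim_equal_contar_traducciones_iguales := by
  intro ing ale _ hpre
  obtain ⟨hing, hale⟩ := hpre
  have hkIng : (PySem.Dict.mk ing).keys.Nodup := hing
  have hkAle : (PySem.Dict.mk ale).keys.Nodup := hale
  unfold Spec_contar_traducciones_iguales contar_traducciones_iguales contar_traducciones_iguales_alt
  simp only [List.nil_append, zero_add, PySem.List.foldl_append_singleton_eq_map,
    PySem.List.foldl_append_if, PySem.Dict.foldl_insert_getD_add_one_eq_counter,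
    PySem.List.foldl_add, List.length_map, PySem.Dict.getD_counter, pertenece_eq_mem]
  rw [← PySem.Dict.values_eq_map_keys (PySem.Dict.mk ale) hkAle ""]
  rw [← List.countP_eq_length_filter]
  rw [sum_count_eq_countP _ _ (PySem.Set.nodup_ofList _)]
  rw [PySem.Dict.values_eq_map_keys (PySem.Dict.mk ing) hkIng "", List.countP_map]
  congr 1
  refine List.countP_congr (fun k _ => ?_)
  simp [PySem.Set.mem_ofList, Function.comp]
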